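-- pv_equiv track=rewrite | github.com/mmertdogann/kNN_Implementation | iris.py | predict_response
-- ===== SOURCE A (Python) =====
-- import operator #For using sort operations
--
-- def predict_response(neighbours):
--     """
--     This function devises a predicted response based on their neighbours as a vote for their class attribute
--     and take the majority vote as the prediction. In the end the function sorts votes and returns the prediction.
--     Function parameters: the data point's neighbours.
--     """
--     vote = {} #create a dictionary to store the response votes.
--
--     for x in range(len(neighbours)): #iterate through neighbours
--         response = neighbours[x][-1] #take the label
--         if response in vote:
--             vote[response] += 1 #if label in vote increase 1
--         else:
--             vote[response] = 1 #if label is not in vote, add into the vote dictionary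
--     sortedVote = sorted(vote.items(), key=operator.itemgetter(1), reverse = True) #sort the votes
--     return sortedVote[0][0] #returns the closest neighbour's label
-- ===== SOURCE B (Python) =====
-- def predict_response(neighbours):
--     """
--     Majority-vote label: collect the labels, dedupe them in first-appearance
--     order, and pick the first label whose count is maximal by a running-best
--     scan over the distinct labels (no dict of counts, no sort).
--     """
--     labels = [n[-1] for n in neighbours]
--     seen = list(dict.fromkeys(labels))
--     best = seen[0]
--     best_count = labels.count(best)
--     for lab in seen[1:]:
--         c = labels.count(lab)
--         if c > best_count:
--             best, best_count = lab, c
--     return best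
-- ===== Notes on version B (the rewrite author's own statement) =====
-- stated objective: alternative
-- what changed: A builds a dict of vote counts in one pass and then sorts its items by count descending, taking the first; B builds no count dict at all: it collects the label list, dedupes it in first-appearance order via dict.fromkeys, and finds the winner with a running-best scan that counts each distinct label with list.count (strict > update, so the first-appearing label wins ties, matching A's stable reverse sort).
import Mathlib
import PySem

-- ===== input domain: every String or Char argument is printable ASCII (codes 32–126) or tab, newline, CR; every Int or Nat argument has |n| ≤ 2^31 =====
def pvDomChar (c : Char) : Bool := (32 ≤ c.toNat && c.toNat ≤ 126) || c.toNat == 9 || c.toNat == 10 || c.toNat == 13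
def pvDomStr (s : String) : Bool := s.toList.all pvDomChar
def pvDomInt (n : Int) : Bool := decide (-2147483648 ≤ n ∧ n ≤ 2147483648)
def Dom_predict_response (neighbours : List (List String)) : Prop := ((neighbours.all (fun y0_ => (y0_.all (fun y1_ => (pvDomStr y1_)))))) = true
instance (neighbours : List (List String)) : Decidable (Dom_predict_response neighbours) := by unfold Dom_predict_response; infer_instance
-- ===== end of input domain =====

-- B replaces A's vote dict + descending sort by: a label list, an ordered dedup
-- (dict.fromkeys) of the distinct labels, and a running-best scan counting each
-- distinct label with list.count — no dict of counts, no sort (objective: alternative).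


-- ===== PORT A =====
-- for x in range(len(neighbours)): count neighbours[x][-1]; then sort items by count
-- descending (stable) and return sortedVote[0][0].  pyGetD defaults are only reached
-- where Python raises (excluded by Pre_).
def predict_response (neighbours : List (List String)) : String :=
  let vote : PySem.Dict String Int :=
    (PySem.List.pyRange 0 (neighbours.length : Int) 1).foldl
      (fun vote x =>
        let response := PySem.List.pyGetD (PySem.List.pyGetD neighbours x []) (-1) ""
        if vote.contains response then
          vote.insert response (vote.getD response 0 + 1)
        else
          vote.insert response 1)
      PySem.Dict.empty
  let sortedVote := PySem.List.sorted vote.items (fun p => p.2) true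
  (PySem.List.pyGetD sortedVote 0 ("", 0)).1

-- ===== PORT B =====
-- labels = [n[-1] for n in neighbours]; seen = list(dict.fromkeys(labels));
-- best = seen[0] with its count; for lab in seen[1:]: strict-> update with labels.count(lab).
def predict_response_alt (neighbours : List (List String)) : String :=
  let labels := neighbours.map (fun n => PySem.List.pyGetD n (-1) "")
  let seen := PySem.List.dedup labels
  let best := PySem.List.pyGetD seen 0 ""
  let best_count : Int := (PySem.List.count labels best : Int)
  ((PySem.List.slice seen (some 1) none).foldl
      (fun bc lab =>
        let c : Int := (PySem.List.count labels lab : Int)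
        if bc.2 < c then (lab, c) else bc)
      (best, best_count)).1

-- ===== PRECONDITION & SPEC =====
-- Python A raises IndexError on empty `neighbours` (sortedVote[0]) and on any empty
-- neighbour row (neighbours[x][-1]); B raises there too (seen[0] resp. n[-1]).
def Pre_predict_response (neighbours : List (List String)) : Prop :=
  neighbours ≠ [] ∧ ∀ n ∈ neighbours, n ≠ []
instance (neighbours : List (List String)) : Decidable (Pre_predict_response neighbours) := by unfold Pre_predict_response; infer_instance

def pvWitness_predict_response : List (List String) := [["1", "a"], ["2", "b"], ["3", "a"]]

def Spec_predict_response (neighbours : List (List String)) (out : String) : Prop := out = predict_response_alt neighbours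
instance (neighbours : List (List String)) (out : String) : Decidable (Spec_predict_response neighbours out) := by unfold Spec_predict_response; infer_instance

-- ===== CLAIM (what is proved, stated in full; the proofs are below) =====
def Claim_equal_predict_response : Prop := ∀ (neighbours : List (List String)), Dom_predict_response neighbours → Pre_predict_response neighbours → Spec_predict_response neighbours (predict_response neighbours)

-- ===== LEMMAS AND PROOFS =====

-- the one-step accumulator of Python max(..., key): keep the earlier element on ties
def maxStep {α κ : Type} [LT κ] [DecidableLT κ] (key : α → κ) (acc : Option α) (x : α) : Option α :=
  match acc with
  | none => some x
  | some m => if key m < key x then some x else some m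

theorem max?_eq_foldl_maxStep {α κ : Type} [LT κ] [DecidableLT κ] (xs : List α) (key : α → κ) :
    PySem.List.max? xs key = xs.foldl (maxStep key) none := rfl

-- head of insertBy (reverse comparator) is one max-step, with no sortedness assumption
theorem head?_insertBy_rev {α κ : Type} [LinearOrder κ] (key : α → κ) (x : α) (acc : List α) :
    (PySem.List.insertBy (fun a b => decide (key b < key a)) x acc).head? =
      maxStep key acc.head? x := by
  cases acc with
  | nil => simp [PySem.List.insertBy, maxStep]
  | cons y ys =>
      by_cases h : key y < key x <;> simp [PySem.List.insertBy, maxStep, h]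

-- the foldl invariant: head of the insertion-sorted (descending) accumulator tracks max?'s accumulator
theorem head?_foldl_insertBy_rev {α κ : Type} [LinearOrder κ] (key : α → κ) :
    ∀ (l acc : List α),
      (l.foldl (fun acc x => PySem.List.insertBy (fun a b => decide (key b < key a)) x acc) acc).head? =
        l.foldl (maxStep key) acc.head? := by
  intro l
  induction l with
  | nil => intro acc; rfl
  | cons x t ih =>
      intro acc
      simp only [List.foldl_cons]
      rw [ih, head?_insertBy_rev]

-- head of sorted(items, key, reverse=True) is max(items, key) — both pick the FIRST maximal element
theorem head?_sorted_rev_eq_max? {α κ : Type} [LinearOrder κ] (l : List α) (key : α → κ) :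
    (PySem.List.sorted l key true).head? = PySem.List.max? l key := by
  rw [PySem.List.sorted_rev_eq_foldl_insertBy, max?_eq_foldl_maxStep]
  exact head?_foldl_insertBy_rev key l []

-- A's counting step equals Counter's: when the label is absent its stored count is 0
theorem count_step_eq :
    (fun (vote : PySem.Dict String Int) (n : List String) =>
        let response := PySem.List.pyGetD n (-1) ""
        if vote.contains response then
          vote.insert response (vote.getD response 0 + 1)
        else
          vote.insert response 1)
      = fun (vote : PySem.Dict String Int) (n : List String) =>
          vote.insert (PySem.List.pyGetD n (-1) "")
            (vote.getD (PySem.List.pyGetD n (-1) "") 0 + 1) := by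
  funext vote n
  simp only []
  split_ifs with h
  · rfl
  · rw [PySem.Dict.getD_of_not_contains _ _ (by simpa using h)]
    norm_num

-- max? over the (label, count) pairs projects to max? over the labels with key = count
theorem foldl_max_map (cnt : String → Int) :
    ∀ (seen : List String) (mo : Option String),
      (seen.map (fun k => ((k, cnt k) : String × Int))).foldl
          (maxStep (fun p => p.2)) (mo.map (fun k => (k, cnt k)))
        = (seen.foldl (maxStep cnt) mo).map (fun k => (k, cnt k)) := by
  intro seen
  induction seen with
  | nil => intro mo; rfl
  | cons x t ih =>
      intro mo
      simp only [List.map_cons, List.foldl_cons]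
      cases mo with
      | none => exact ih (some x)
      | some m =>
          by_cases h : cnt m < cnt x
          · simpa [maxStep, h] using ih (some x)
          · simpa [maxStep, h] using ih (some m)

theorem max?_map_pair (cnt : String → Int) (seen : List String) :
    PySem.List.max? (seen.map (fun k => ((k, cnt k) : String × Int))) (fun p => p.2)
      = (PySem.List.max? seen cnt).map (fun k => (k, cnt k)) := by
  rw [max?_eq_foldl_maxStep, max?_eq_foldl_maxStep]
  simpa using foldl_max_map cnt seen none

-- B's running-best pair scan computes the first strictly-maximal label (max?'s accumulator)
theorem scan_pair (cnt : String → Int) :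
    ∀ (t : List String) (m : String),
      ∃ w,
        t.foldl (maxStep cnt) (some m) = some w ∧
        t.foldl (fun bc lab => if bc.2 < cnt lab then (lab, cnt lab) else bc) (m, cnt m)
          = (w, cnt w) := by
  intro t
  induction t with
  | nil => intro m; exact ⟨m, rfl, rfl⟩
  | cons x t ih =>
      intro m
      simp only [List.foldl_cons]
      by_cases h : cnt m < cnt x
      · simpa [maxStep, h] using ih x
      · simpa [maxStep, h] using ih m

-- ===== VERDICT (by name: the statement is the Claim_ definition above) =====
theorem predict_response_spec : Claim_equal_predict_response := by
  intro neighbours _ _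
  unfold Spec_predict_response predict_response predict_response_alt
  rw [PySem.List.foldl_pyRange_zero_pyGetD' neighbours []
        (fun (vote : PySem.Dict String Int) (n : List String) =>
          let response := PySem.List.pyGetD n (-1) ""
          if vote.contains response then
            vote.insert response (vote.getD response 0 + 1)
          else
            vote.insert response 1) PySem.Dict.empty,
      count_step_eq,
      ← List.foldl_map (f := fun (n : List String) => PySem.List.pyGetD n (-1) "")
        (g := fun (d : PySem.Dict String Int) (x : String) => d.insert x (d.getD x 0 + 1)),
      PySem.Dict.foldl_insert_getD_add_one_eq_counter]
  have hgetD : ∀ (xs : List (String × Int)),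
      PySem.List.pyGetD xs 0 ("", 0) = xs.head?.getD ("", 0) := by
    intro xs; cases xs <;> simp [PySem.List.pyGetD, PySem.List.pyGet?, PySem.List.pyIdx?]
  simp only []
  rw [hgetD, head?_sorted_rev_eq_max?, PySem.Dict.items_counter]
  set labels := neighbours.map (fun n => PySem.List.pyGetD n (-1) "") with hlabels
  cases hseen : PySem.List.dedup labels with
  | nil =>
      simp [PySem.List.dedup] at hseen
      simp [PySem.List.max?, hseen, PySem.List.slice, PySem.List.pyGetD,
        PySem.List.pyGet?, PySem.List.pyIdx?]
  | cons h t =>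
      have hset : PySem.Set.ofList labels = h :: t := by
        simpa [PySem.List.dedup] using hseen
      rw [hset, PySem.List.slice_from_one,
          max?_map_pair (fun k => ((List.count k labels : Nat) : Int)) (h :: t),
          max?_eq_foldl_maxStep]
      simp only [List.foldl_cons, List.tail_cons, PySem.List.pyGetD_zero_cons,
        PySem.List.count, maxStep]
      obtain ⟨w, hw1, hw2⟩ := scan_pair (fun k => ((List.count k labels : Nat) : Int)) t h
      rw [hw1, hw2]
      simp
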